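-- pv_equiv track=rewrite | github.com/sgrolab/dictymodels | Population_parallel_tools.py | all_indices
-- ===== SOURCE A (Python) =====
-- def all_indices(a_array, b_array):
--     ''' Take two incoming 1-D arrays. Generate
--         a list of tuples containing indices to
--         access all combinations of the values in
--         the two arrays.  For use with a grid search
--         over the values spanned by the two arrays.
--
--         Returns:  ((0,0),(0,1),...,(N,M)) '''
--     indices=[None] * len(a_array) * len(b_array)
--     i = 0
--     # simple way with a pair of for loops.
--     for a in range(len(a_array)):
--         for b in range(len(b_array)):
--             indices[i] = (a,b)
--             i += 1
--     return indices
-- ===== SOURCE B (Python) =====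
-- def all_indices(a_array, b_array):
--     ''' Same result as A: one flat pass with divmod index decomposition. '''
--     M = len(b_array)
--     return [(i // M, i % M) for i in range(len(a_array) * M)]
-- ===== Notes on version B (the rewrite author's own statement) =====
-- stated objective: alternative
-- what changed: Replaces the two nested counting loops writing into a preallocated list through a manual cursor with a single flat pass over range(len(a)*len(b)) that reconstructs each pair as (i // M, i % M).
import Mathlib
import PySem

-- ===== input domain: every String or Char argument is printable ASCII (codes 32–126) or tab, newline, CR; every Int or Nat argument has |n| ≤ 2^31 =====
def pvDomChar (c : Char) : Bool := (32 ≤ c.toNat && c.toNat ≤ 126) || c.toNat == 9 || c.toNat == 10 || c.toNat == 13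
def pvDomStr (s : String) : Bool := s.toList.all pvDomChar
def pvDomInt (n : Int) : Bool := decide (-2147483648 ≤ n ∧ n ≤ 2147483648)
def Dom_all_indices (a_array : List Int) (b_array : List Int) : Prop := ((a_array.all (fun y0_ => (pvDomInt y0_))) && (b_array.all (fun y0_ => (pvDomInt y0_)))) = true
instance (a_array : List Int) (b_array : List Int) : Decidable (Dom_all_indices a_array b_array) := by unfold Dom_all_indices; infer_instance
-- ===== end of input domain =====

-- ===== PORT A =====
-- Port of A: preallocated slot list (None -> Option), nested index loops with a manual
-- cursor writing each pair into its slot, then the fully-filled list is read back.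
def all_indices (a_array : List Int) (b_array : List Int) : List (Int × Int) :=
  let indices : List (Option (Int × Int)) :=
    List.replicate (a_array.length * b_array.length) none
  let st :=
    (PySem.List.pyRange 0 (a_array.length : Int) 1).foldl
      (fun (st : List (Option (Int × Int)) × Nat) a =>
        (PySem.List.pyRange 0 (b_array.length : Int) 1).foldl
          (fun st b => (st.1.set st.2 (some (a, b)), st.2 + 1)) st)
      (indices, 0)
  st.1.map (fun o => o.getD (0, 0))  -- every slot was filled; getD only unwraps `some`

-- ===== PORT B =====
-- Port of B: one flat pass over range(len(a)*len(b)), pair rebuilt by divmod.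
def all_indices_alt (a_array : List Int) (b_array : List Int) : List (Int × Int) :=
  let M : Int := b_array.length
  (PySem.List.pyRange 0 ((a_array.length : Int) * M) 1).map
    (fun i => (PySem.Int.floordiv i M, PySem.Int.mod i M))

-- ===== PRECONDITION & SPEC =====
def Spec_all_indices (a_array : List Int) (b_array : List Int) (out : List (Int × Int)) : Prop := out = all_indices_alt a_array b_array
instance (a_array : List Int) (b_array : List Int) (out : List (Int × Int)) : Decidable (Spec_all_indices a_array b_array out) := by unfold Spec_all_indices; infer_instance

-- ===== CLAIM (what is proved, stated in full; the proofs are below) =====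
def Claim_equal_all_indices : Prop := ∀ (a_array : List Int) (b_array : List Int), Dom_all_indices a_array b_array → Spec_all_indices a_array b_array (all_indices a_array b_array)

-- ===== LEMMAS AND PROOFS =====

/-- The canonical row-major product of index ranges both ports compute. -/
def pvProd (n m : Nat) : List (Int × Int) :=
  (List.range n).flatMap (fun (a : Nat) => (List.range m).map (fun (b : Nat) => ((a : Int), (b : Int))))

/-- B's flat divmod pass produces the canonical product. -/
lemma alt_eq_prod (n m : Nat) :
    (PySem.List.pyRange 0 ((n : Int) * (m : Int)) 1).map
      (fun i => (PySem.Int.floordiv i (m : Int), PySem.Int.mod i (m : Int)))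
      = pvProd n m := by
  have hcast : ((n : Int) * (m : Int)) = ((n * m : Nat) : Int) := by push_cast; ring
  rw [hcast, PySem.List.pyRange_zero_nat, List.map_map]
  have hsimp : ∀ k : Nat,
      ((fun i => (PySem.Int.floordiv i (m : Int), PySem.Int.mod i (m : Int))) ∘ (fun k : Nat => (k : Int))) k
        = ((((k / m : Nat)) : Int), (((k % m : Nat)) : Int)) := by
    intro k; simp
  rw [List.map_congr_left (fun k _ => hsimp k)]
  clear hcast hsimp
  induction n with
  | zero => simp [pvProd]
  | succ n ih =>
      have hrange : List.range ((n + 1) * m) = List.range (n * m) ++ (List.range m).map (fun x => n * m + x) := by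
        rw [Nat.succ_mul, List.range_add]
      rw [hrange, List.map_append, ih, List.map_map]
      have htail : ((List.range m).map ((fun k : Nat => ((((k / m : Nat)) : Int), (((k % m : Nat)) : Int))) ∘ (fun x => n * m + x)))
          = (List.range m).map (fun b : Nat => ((n : Int), (b : Int))) := by
        apply List.map_congr_left
        intro j hj
        have hjm : j < m := List.mem_range.mp hj
        have hm : 0 < m := Nat.lt_of_le_of_lt (Nat.zero_le j) hjm
        have hdiv : (n * m + j) / m = n := by
          rw [Nat.add_comm, Nat.add_mul_div_right _ _ hm, Nat.div_eq_of_lt hjm]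
          omega
        have hmod : (n * m + j) % m = j := by
          rw [Nat.add_comm, Nat.add_mul_mod_self_right, Nat.mod_eq_of_lt hjm]
        simp [Function.comp, hdiv, hmod]
      rw [htail]
      have hsplit : pvProd (n + 1) m = pvProd n m ++ (List.range m).map (fun b : Nat => ((n : Int), (b : Int))) := by
        rw [pvProd, List.range_succ, List.flatMap_append]
        simp [pvProd]
      rw [hsplit]

/-- The slot-writing step of A's loops. -/
def pvStep (st : List (Option (Int × Int)) × Nat) (p : Int × Int) :
    List (Option (Int × Int)) × Nat :=
  (st.1.set st.2 (some p), st.2 + 1)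

/-- Writing the pairs `ps` one after another at the cursor fills them in order. -/
lemma foldl_pvStep (ps F : List (Int × Int)) (r : Nat) (h : ps.length ≤ r) :
    ps.foldl pvStep (F.map some ++ List.replicate r none, F.length)
      = ((F ++ ps).map some ++ List.replicate (r - ps.length) none, F.length + ps.length) := by
  induction ps generalizing F r with
  | nil => simp
  | cons p ps ih =>
      cases r with
      | zero => simp at h
      | succ r =>
          have hset : (F.map some ++ List.replicate (r + 1) none).set F.length (some p)
              = (F ++ [p]).map some ++ List.replicate r none := by
            rw [List.set_append]
            simp [List.replicate_succ]
          simp only [List.foldl_cons, pvStep]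
          rw [hset]
          have h' : ps.length ≤ r := by simpa using Nat.succ_le_succ_iff.mp (by simpa using h)
          have := ih (F ++ [p]) r h'
          simp only [List.length_append, List.length_cons, List.length_nil, Nat.zero_add] at this
          rw [this]
          rw [Prod.ext_iff]
          constructor
          · simp [List.append_assoc, Nat.succ_sub_succ]
          · simp only [List.length_cons]
            omega

/-- A's nested loops, flattened: they fold `pvStep` over the canonical product. -/
lemma nested_eq_foldl_prod (n m : Nat) (init : List (Option (Int × Int)) × Nat) :
    (PySem.List.pyRange 0 (n : Int) 1).foldl
      (fun st a => (PySem.List.pyRange 0 (m : Int) 1).foldl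
        (fun st b => (st.1.set st.2 (some (a, b)), st.2 + 1)) st) init
      = (pvProd n m).foldl pvStep init := by
  unfold pvProd pvStep
  rw [List.foldl_flatMap]
  simp only [PySem.List.pyRange_zero_nat, List.foldl_map]

lemma length_pvProd (n m : Nat) : (pvProd n m).length = n * m := by
  simp [pvProd, List.map_const']

-- ===== VERDICT (by name: the statement is the Claim_ definition above) =====
theorem all_indices_spec : Claim_equal_all_indices := by
  intro a_array b_array _
  unfold Spec_all_indices all_indices all_indices_alt
  dsimp only
  rw [alt_eq_prod a_array.length b_array.length]
  rw [nested_eq_foldl_prod a_array.length b_array.length]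
  rw [show (List.replicate (a_array.length * b_array.length) (none : Option (Int × Int)), 0)
        = ((([] : List (Int × Int)).map some ++ List.replicate ((pvProd a_array.length b_array.length).length) none),
           ([] : List (Int × Int)).length) from by simp [length_pvProd]]
  rw [foldl_pvStep _ [] _ (le_refl _)]
  simp [List.map_map]
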